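-- pv_equiv track=rewrite | github.com/Vikramsinghbrahm/Online-Graph-Coloring-Analysis | backend/graph_coloring/algorithms.py | cbip_coloring
-- ===== SOURCE A (Python) =====
-- from collections import deque
--
-- Graph = dict[int, list[int]]
--
-- Coloring = dict[int, int]
--
-- def _smallest_available_color(used_colors: set[int]) -> int:
--     color = 1
--     while color in used_colors:
--         color += 1
--     return color
--
-- def _induced_subgraph(graph: Graph, vertices: list[int], vertex_set: set[int]) -> Graph:
--     return {
--         vertex: [neighbor for neighbor in graph[vertex] if neighbor in vertex_set]
--         for vertex in vertices
--     }
--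
-- def _opposite_partition(prefix_graph: Graph, start_vertex: int) -> set[int]:
--     queue: deque[int] = deque([start_vertex])
--     parity = {start_vertex: 0}
--
--     while queue:
--         vertex = queue.popleft()
--         for neighbor in prefix_graph[vertex]:
--             expected_parity = 1 - parity[vertex]
--             if neighbor not in parity:
--                 parity[neighbor] = expected_parity
--                 queue.append(neighbor)
--                 continue
--
--             if parity[neighbor] != expected_parity:
--                 raise ValueError("CBIP requires a bipartite graph.")
--
--     return {vertex for vertex, partition in parity.items() if partition == 1}
--
-- def cbip_coloring(graph: Graph) -> Coloring:
--     coloring: Coloring = {}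
--     revealed_vertices: list[int] = []
--     revealed_set: set[int] = set()
--
--     for vertex in sorted(graph):
--         revealed_vertices.append(vertex)
--         revealed_set.add(vertex)
--
--         prefix_graph = _induced_subgraph(graph, revealed_vertices, revealed_set)
--         opposite_partition = _opposite_partition(prefix_graph, vertex)
--         used_colors = {coloring[other_vertex] for other_vertex in opposite_partition if other_vertex in coloring}
--         coloring[vertex] = _smallest_available_color(used_colors)
--
--     return coloring
-- ===== SOURCE B (Python) =====
-- def cbip_coloring(graph):
--     order = sorted(graph)
--     radj = {v: [] for v in order}          # reverse edges among keys, built once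
--     for v in order:
--         for u in graph[v]:
--             if u in radj:
--                 radj[u].append(v)
--     coloring = {}
--     adj = {}                               # prefix adjacency, grown incrementally
--     for v in order:
--         adj[v] = []
--         for u in graph[v]:
--             if u in adj:
--                 adj[v].append(u)
--         for u in radj[v]:
--             if u in adj:
--                 adj[u].append(v)
--         parity = {v: 0}
--         stack = [v]
--         while stack:
--             x = stack.pop()
--             opposite = 1 - parity[x]
--             for y in adj[x]:
--                 if y not in parity:
--                     parity[y] = opposite
--                     stack.append(y)
--         used = set()
--         for w, p in parity.items():
--             if p == 1 and w in coloring: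
--                 used.add(coloring[w])
--         for color in range(1, len(used) + 2):
--             if color not in used:
--                 break
--         coloring[v] = color
--     return coloring
-- ===== Notes on version B (the rewrite author's own statement) =====
-- stated objective: alternative
-- what changed: B builds a reverse-edge index once and grows the revealed-prefix adjacency incrementally (appending each newly revealed vertex to its already-revealed neighbours), explores only the new vertex's component with an iterative DFS stack, and picks the colour as the first free value in range(1, len(used)+2), instead of A's per-step reconstruction of the whole induced prefix subgraph followed by a deque BFS with bipartiteness re-verification; …
import Mathlib
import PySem

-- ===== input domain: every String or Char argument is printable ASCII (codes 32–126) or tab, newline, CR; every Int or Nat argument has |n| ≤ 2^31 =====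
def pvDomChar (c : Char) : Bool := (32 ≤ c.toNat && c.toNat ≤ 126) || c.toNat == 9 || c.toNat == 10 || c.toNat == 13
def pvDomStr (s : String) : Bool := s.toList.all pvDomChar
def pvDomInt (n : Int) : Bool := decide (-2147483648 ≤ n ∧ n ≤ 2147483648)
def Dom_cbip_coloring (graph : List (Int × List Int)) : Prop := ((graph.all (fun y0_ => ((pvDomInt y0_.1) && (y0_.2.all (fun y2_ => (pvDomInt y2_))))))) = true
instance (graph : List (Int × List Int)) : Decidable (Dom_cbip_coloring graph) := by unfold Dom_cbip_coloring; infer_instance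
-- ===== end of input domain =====

-- B replaces A's per-step induced-subgraph rebuild + deque BFS by a once-built reverse-edge
-- index, an incrementally grown prefix adjacency, a DFS stack and a first-free-in-range colour
-- pick (objective: alternative traversal of the same data).

-- ===== PORT A =====

-- while color in used_colors: color += 1   (fuel = used.length + 1 always suffices)
def pvSmallestAvailable (used : PySem.Set Int) : Nat → Int → Int
  | 0, color => color
  | fuel+1, color =>
    if PySem.Set.contains used color then pvSmallestAvailable used fuel (color + 1) else color

-- _induced_subgraph
def pvInducedSubgraph (d : PySem.Dict Int (List Int)) (vertices : List Int)
    (vset : PySem.Set Int) : PySem.Dict Int (List Int) :=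
  vertices.foldl
    (fun acc x => acc.insert x ((d.getD x []).filter (fun y => PySem.Set.contains vset y)))
    PySem.Dict.empty

-- the body of the BFS while-loop: one vertex's neighbour scan (none = ValueError)
def pvBfsScan (par : PySem.Dict Int Int) (x : Int) (queue : List Int) (ns : List Int) :
    Option (List Int × PySem.Dict Int Int) :=
  ns.foldl
    (fun st y =>
      match st with
      | none => none
      | some (q, p) =>
        let expected := 1 - p.getD x 0
        if p.contains y then
          if p.getD y 0 ≠ expected then none else some (q, p)
        else some (q ++ [y], p.insert y expected))
    (some (queue, par))

-- _opposite_partition's 'while queue:' loop (fuel only makes it total; none = ValueError)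
def pvBfs (pg : PySem.Dict Int (List Int)) :
    Nat → List Int → PySem.Dict Int Int → Option (PySem.Dict Int Int)
  | 0, _, _ => none
  | _+1, [], par => some par
  | fuel+1, x :: queue, par =>
    match pvBfsScan par x queue (pg.getD x []) with
    | none => none
    | some (q, par') => pvBfs pg fuel q par'

-- the body of A's 'for vertex in sorted(graph):' loop
def pvStepA (d : PySem.Dict Int (List Int))
    (st : Option (PySem.Dict Int Int × List Int × PySem.Set Int)) (v : Int) :
    Option (PySem.Dict Int Int × List Int × PySem.Set Int) :=
  match st with
  | none => none
  | some (coloring, revealed, rset) =>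
    let revealed := revealed ++ [v]
    let rset := PySem.Set.add rset v
    let pg := pvInducedSubgraph d revealed rset
    match pvBfs pg (2 * revealed.length + 2) [v] (PySem.Dict.empty.insert v 0) with
    | none => none
    | some par =>
      let opp := PySem.Set.ofList ((par.items.filter (fun p => p.2 == 1)).map Prod.fst)
      let used : PySem.Set Int :=
        PySem.Set.ofList ((opp.filter (fun u => coloring.contains u)).map
          (fun u => coloring.getD u 0))
      let color := pvSmallestAvailable used (used.length + 1) 1
      some (coloring.insert v color, revealed, rset)

def cbip_coloring (graph : List (Int × List Int)) : List (Int × Int) :=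
  let d := PySem.Dict.ofList graph
  match (PySem.List.sorted d.keys (fun x => x) false).foldl (pvStepA d)
      (some (PySem.Dict.empty, ([], PySem.Set.empty))) with
  | none => []   -- ValueError("CBIP requires a bipartite graph.") propagates; outside Pre_
  | some (coloring, _, _) => coloring.items

-- ===== PORT B =====

-- 'for color in range(1, len(used) + 2): if color not in used: break'
-- (the range always holds a free colour: used has len(used) distinct elements; [] is unreachable)
def pvFirstFree (used : PySem.Set Int) : List Int → Int
  | [] => 0
  | c :: rest => if PySem.Set.contains used c then pvFirstFree used rest else c

-- the 'while stack:' loop (stack top = list head; fuel only makes it total)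
def pvDfs (adj : PySem.Dict Int (List Int)) :
    Nat → List Int → PySem.Dict Int Int → PySem.Dict Int Int
  | 0, _, par => par
  | _+1, [], par => par
  | fuel+1, x :: stack, par =>
    let opposite := 1 - par.getD x 0
    let s := (adj.getD x []).foldl
      (fun (st : List Int × PySem.Dict Int Int) y =>
        if st.2.contains y then st else (y :: st.1, st.2.insert y opposite))
      (stack, par)
    pvDfs adj fuel s.1 s.2

-- 'radj = {v: [] for v in order}'
def pvRadjInit (order : List Int) : PySem.Dict Int (List Int) :=
  order.foldl (fun r v => r.insert v ([] : List Int)) PySem.Dict.empty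

-- 'for v in order: for u in graph[v]: if u in radj: radj[u].append(v)'
def pvRadjStep (d : PySem.Dict Int (List Int)) (r : PySem.Dict Int (List Int)) (v : Int) :
    PySem.Dict Int (List Int) :=
  (d.getD v []).foldl
    (fun r u => if r.contains u then r.modify u [] (fun l => l ++ [v]) else r) r

-- the body of B's main 'for v in order:' loop
def pvStepB (d radj : PySem.Dict Int (List Int))
    (st : PySem.Dict Int Int × PySem.Dict Int (List Int)) (v : Int) :
    PySem.Dict Int Int × PySem.Dict Int (List Int) :=
  let coloring := st.1
  let adj := st.2.insert v ([] : List Int)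
  let adj := (d.getD v []).foldl
    (fun a u => if a.contains u then a.modify v [] (fun l => l ++ [u]) else a) adj
  let adj := (radj.getD v []).foldl
    (fun a u => if a.contains u then a.modify u [] (fun l => l ++ [v]) else a) adj
  let par := pvDfs adj (2 * adj.size + 2) [v] (PySem.Dict.empty.insert v 0)
  let used := par.items.foldl
    (fun s p =>
      if p.2 == 1 && coloring.contains p.1 then PySem.Set.add s (coloring.getD p.1 0) else s)
    PySem.Set.empty
  let color := pvFirstFree used (PySem.List.pyRange 1 ((used.length : Int) + 2) 1)
  (coloring.insert v color, adj)

def cbip_coloring_alt (graph : List (Int × List Int)) : List (Int × Int) :=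
  let d := PySem.Dict.ofList graph
  let order := PySem.List.sorted d.keys (fun x => x) false
  let radj := order.foldl (pvRadjStep d) (pvRadjInit order)
  (order.foldl (pvStepB d radj) (PySem.Dict.empty, PySem.Dict.empty)).1.items

-- ===== PRECONDITION & SPEC =====

-- Pre_ excludes exactly the inputs on which A raises ValueError("CBIP requires a bipartite
-- graph."): those where, for some sorted-key prefix ending in vertex v, the part of the prefix
-- reachable from v along key-to-key edges admits no 2-colouring — stated as the existence, for
-- every prefix, of an edge-closed, 2-colourable subset S of the prefix containing its last
-- vertex (S then contains the reachable part, and conversely the reachable part itself is such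
-- an S whenever the traversal completes).
def Pre_cbip_coloring (graph : List (Int × List Int)) : Prop :=
  ∀ k ∈ List.range (PySem.List.sorted (PySem.Dict.ofList graph).keys (fun x => x) false).length,
    ∃ S ∈ ((PySem.List.sorted (PySem.Dict.ofList graph).keys (fun x => x) false).take (k+1)).sublists,
      (PySem.List.sorted (PySem.Dict.ofList graph).keys (fun x => x) false).getD k 0 ∈ S ∧
      (∀ x ∈ S, ∀ y ∈ (PySem.Dict.ofList graph).getD x [],
        y ∈ (PySem.List.sorted (PySem.Dict.ofList graph).keys (fun x => x) false).take (k+1) → y ∈ S) ∧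
      ∃ s ∈ S.sublists,
        ∀ x ∈ S, ∀ y ∈ (PySem.Dict.ofList graph).getD x [], y ∈ S → ((x ∈ s) ↔ y ∉ s)

instance (graph : List (Int × List Int)) : Decidable (Pre_cbip_coloring graph) := by
  unfold Pre_cbip_coloring; infer_instance

def pvWitness_cbip_coloring : (List (Int × List Int)) := [(0, [1]), (1, [0])]

def Spec_cbip_coloring (graph : List (Int × List Int)) (out : List (Int × Int)) : Prop :=
  out = cbip_coloring_alt graph
instance (graph : List (Int × List Int)) (out : List (Int × Int)) :
    Decidable (Spec_cbip_coloring graph out) := by unfold Spec_cbip_coloring; infer_instance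

-- ===== CLAIM (what is proved, stated in full; the proofs are below) =====
def Claim_equal_cbip_coloring : Prop :=
  ∀ (graph : List (Int × List Int)), Dom_cbip_coloring graph → Pre_cbip_coloring graph →
    Spec_cbip_coloring graph (cbip_coloring graph)

-- ===== LEMMAS AND PROOFS =====

lemma pvModifyApp_keys (r : PySem.Dict Int (List Int)) (u0 : Int) (w : List Int → List Int)
    (hc : r.contains u0 = true) :
    (r.modify u0 [] w).keys = r.keys := by
  rw [PySem.Dict.keys_modify, PySem.Dict.keys_insert_of_contains _ _ hc]

lemma pvModifyApp_contains (r : PySem.Dict Int (List Int)) (u0 z : Int) (w : List Int → List Int)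
    (hc : r.contains u0 = true) :
    (r.modify u0 [] w).contains z = r.contains z := by
  by_cases hz : z ∈ r.keys
  · rw [(PySem.Dict.contains_iff_mem_keys _ _).2 hz,
      (PySem.Dict.contains_iff_mem_keys _ _).2 (by rw [pvModifyApp_keys r u0 w hc]; exact hz)]
  · have h1 : r.contains z = false := by
      rw [← Bool.not_eq_true, PySem.Dict.contains_iff_mem_keys]; exact hz
    have h2 : (r.modify u0 [] w).contains z = false := by
      rw [← Bool.not_eq_true, PySem.Dict.contains_iff_mem_keys, pvModifyApp_keys r u0 w hc]
      exact hz
    rw [h1, h2]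

-- 'for u in ns: if u in a: a[v].append(u)'

lemma pvSelfFold_keys (v : Int) :
    ∀ (ns : List Int) (a : PySem.Dict Int (List Int)), a.contains v = true →
      (ns.foldl (fun a u => if a.contains u then a.modify v [] (fun l => l ++ [u]) else a) a).keys
        = a.keys := by
  intro ns
  induction ns with
  | nil => intro a _; rfl
  | cons u0 rest ih =>
    intro a hv
    simp only [List.foldl_cons]
    by_cases hc : a.contains u0 = true
    · rw [hc]; simp only [if_true]
      rw [ih _ (by rw [pvModifyApp_contains _ _ _ _ hv]; exact hv), pvModifyApp_keys _ _ _ hv]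
    · rw [Bool.not_eq_true] at hc
      rw [hc]; simp only [Bool.false_eq_true, if_false]; exact ih a hv

lemma pvSelfFold_mem (v : Int) :
    ∀ (ns : List Int) (a : PySem.Dict Int (List Int)), a.contains v = true →
      ∀ x y, y ∈ (ns.foldl (fun a u => if a.contains u then a.modify v [] (fun l => l ++ [u]) else a) a).getD x [] ↔
        (y ∈ a.getD x [] ∨ (x = v ∧ y ∈ ns ∧ a.contains y = true)) := by
  intro ns
  induction ns with
  | nil => intro a _ x y; simp
  | cons u0 rest ih =>
    intro a hv x y
    simp only [List.foldl_cons]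
    by_cases hc : a.contains u0 = true
    · rw [hc]; simp only [if_true]
      have hv' : (a.modify v [] (fun l => l ++ [u0])).contains v = true := by
        rw [pvModifyApp_contains _ _ _ _ hv]; exact hv
      rw [ih _ hv']
      rw [pvModifyApp_contains _ _ _ _ hv]
      rw [PySem.Dict.getD_modify]
      by_cases hx : x = v
      · subst hx
        rw [if_pos rfl]
        simp only [List.mem_append, List.mem_cons, List.not_mem_nil, or_false,
          eq_self_iff_true, true_and]
        constructor
        · rintro ((h | h) | h2)
          · exact Or.inl h
          · exact Or.inr ⟨Or.inl h, h ▸ hc⟩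
          · exact Or.inr ⟨Or.inr h2.1, h2.2⟩
        · rintro (h | ⟨h1 | h1, h3⟩)
          · exact Or.inl (Or.inl h)
          · exact Or.inl (Or.inr h1)
          · exact Or.inr ⟨h1, h3⟩
      · rw [if_neg hx]
        simp only [List.mem_cons]
        tauto
    · rw [Bool.not_eq_true] at hc
      rw [hc]; simp only [Bool.false_eq_true, if_false]
      rw [ih a hv]
      simp only [List.mem_cons]
      constructor
      · rintro (h | ⟨h1, h2, h3⟩)
        · exact Or.inl h
        · exact Or.inr ⟨h1, Or.inr h2, h3⟩
      · rintro (h | ⟨h1, h2 | h2, h3⟩)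
        · exact Or.inl h
        · subst h2; rw [hc] at h3; exact absurd h3 (by simp)
        · exact Or.inr ⟨h1, h2, h3⟩

lemma pvAppendFold_keys (v : Int) :
    ∀ (ns : List Int) (r : PySem.Dict Int (List Int)),
      (ns.foldl (fun r u => if r.contains u then r.modify u [] (fun l => l ++ [v]) else r) r).keys
        = r.keys := by
  intro ns
  induction ns with
  | nil => intro r; rfl
  | cons u0 rest ih =>
    intro r
    simp only [List.foldl_cons]
    by_cases hc : r.contains u0 = true
    · rw [hc]; simp only [if_true]; rw [ih, pvModifyApp_keys r u0 _ hc]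
    · rw [Bool.not_eq_true] at hc
      rw [hc]; simp only [Bool.false_eq_true, if_false]; exact ih r

lemma pvAppendFold_mem (v : Int) :
    ∀ (ns : List Int) (r : PySem.Dict Int (List Int)) (u y : Int),
      y ∈ (ns.foldl (fun r u => if r.contains u then r.modify u [] (fun l => l ++ [v]) else r) r).getD u [] ↔
        (y ∈ r.getD u [] ∨ (y = v ∧ u ∈ ns ∧ r.contains u = true)) := by
  intro ns
  induction ns with
  | nil => intro r u y; simp
  | cons u0 rest ih =>
    intro r u y
    simp only [List.foldl_cons]
    by_cases hc : r.contains u0 = true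
    · rw [hc]; simp only [if_true]
      rw [ih]
      rw [pvModifyApp_contains r u0 u _ hc]
      rw [PySem.Dict.getD_modify]
      by_cases hu : u = u0
      · subst hu
        rw [if_pos rfl]
        simp only [List.mem_append, List.mem_singleton, List.mem_cons]
        have hu0 := hc
        tauto
      · rw [if_neg hu]
        simp only [List.mem_cons]
        tauto
    · rw [Bool.not_eq_true] at hc
      rw [hc]; simp only [Bool.false_eq_true, if_false]
      rw [ih]
      simp only [List.mem_cons]
      constructor
      · rintro (h | ⟨h1, h2, h3⟩)
        · exact Or.inl h
        · exact Or.inr ⟨h1, Or.inr h2, h3⟩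
      · rintro (h | ⟨h1, h2 | h2, h3⟩)
        · exact Or.inl h
        · subst h2; rw [hc] at h3; exact absurd h3 (by simp)
        · exact Or.inr ⟨h1, h2, h3⟩

lemma pvRadjInit_keys (order : List Int) (hnd : order.Nodup) : (pvRadjInit order).keys = order := by
  unfold pvRadjInit
  rw [PySem.Dict.keys_foldl_insert]
  rw [PySem.Dict.keys_empty, PySem.Set.update_nil_left, PySem.Set.ofList_eq_self_of_nodup _ hnd]

lemma pvRadjInit_getD (order : List Int) (hnd : order.Nodup) (u : Int) :
    (pvRadjInit order).getD u [] = [] := by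
  by_cases hu : u ∈ order
  · have hfresh : ∀ a ∈ order, (PySem.Dict.empty : PySem.Dict Int (List Int)).contains a = false := by
      intro a _; exact PySem.Dict.contains_empty a
    have hmap : (order.map (fun a => a)).Nodup := by simpa using hnd
    have hitems := PySem.Dict.items_foldl_insert_fresh order (fun a => a)
        (fun _ => ([] : List Int)) PySem.Dict.empty hfresh hmap
    have hknd : (pvRadjInit order).keys.Nodup := by rw [pvRadjInit_keys order hnd]; exact hnd
    have hmem : (u, ([] : List Int)) ∈ (pvRadjInit order).items := by
      unfold pvRadjInit
      rw [hitems]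
      have : (PySem.Dict.empty : PySem.Dict Int (List Int)).items = [] := rfl
      rw [this, List.nil_append, List.mem_map]
      exact ⟨u, hu, rfl⟩
    exact PySem.Dict.getD_of_mem_items _ hmem hknd []
  · apply PySem.Dict.getD_of_not_contains
    rw [← Bool.not_eq_true, PySem.Dict.contains_iff_mem_keys, pvRadjInit_keys order hnd]
    exact hu

lemma pvRadjFold_mem (d : PySem.Dict Int (List Int)) (order : List Int) :
    ∀ (todo : List Int) (r : PySem.Dict Int (List Int)) (Q : Int → Int → Prop),
      r.keys = order →
      (∀ u y, y ∈ r.getD u [] ↔ Q u y) →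
      ∀ u y, y ∈ (todo.foldl (pvRadjStep d) r).getD u [] ↔
        (Q u y ∨ (y ∈ todo ∧ u ∈ d.getD y [] ∧ u ∈ order)) := by
  intro todo
  induction todo with
  | nil => intro r Q hk hQ u y; simp [hQ]
  | cons v rest ih =>
    intro r Q hk hQ u y
    simp only [List.foldl_cons]
    have hk' : (pvRadjStep d r v).keys = order := by
      unfold pvRadjStep; rw [pvAppendFold_keys, hk]
    have hQ' : ∀ u y, y ∈ (pvRadjStep d r v).getD u [] ↔
        (Q u y ∨ (y = v ∧ u ∈ d.getD v [] ∧ u ∈ order)) := by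
      intro u y
      unfold pvRadjStep
      rw [pvAppendFold_mem, hQ]
      have : r.contains u = true ↔ u ∈ order := by
        rw [PySem.Dict.contains_iff_mem_keys, hk]
      tauto
    rw [ih (pvRadjStep d r v) _ hk' hQ' u y]
    simp only [List.mem_cons]
    constructor
    · rintro ((h | ⟨h1, h2, h3⟩) | ⟨h1, h2, h3⟩)
      · exact Or.inl h
      · exact Or.inr ⟨Or.inl h1, by rw [h1]; exact h2, h3⟩
      · exact Or.inr ⟨Or.inr h1, h2, h3⟩
    · rintro (h | ⟨h1 | h1, h2, h3⟩)
      · exact Or.inl (Or.inl h)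
      · exact Or.inl (Or.inr ⟨h1, by rw [← h1]; exact h2, h3⟩)
      · exact Or.inr ⟨h1, h2, h3⟩

lemma pvRadj_adj (d : PySem.Dict Int (List Int)) (order : List Int) (hnd : order.Nodup) :
    ∀ u y, u ∈ (order.foldl (pvRadjStep d) (pvRadjInit order)).getD y []  ↔
      (y ∈ order ∧ u ∈ order ∧ y ∈ d.getD u []) := by
  intro u y
  rw [pvRadjFold_mem d order order (pvRadjInit order) (fun _ _ => False)
    (pvRadjInit_keys order hnd) (by intro a b; simp [pvRadjInit_getD order hnd]) y u]
  tauto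

lemma pvAdjStep (d radj : PySem.Dict Int (List Int)) (order P : List Int) (v : Int)
    (hradj : ∀ u y, u ∈ radj.getD y [] ↔ (y ∈ order ∧ u ∈ order ∧ y ∈ d.getD u []))
    (hPo : ∀ a ∈ P, a ∈ order) (hvo : v ∈ order) (hvP : v ∉ P)
    (adj : PySem.Dict Int (List Int)) (hk : adj.keys = P)
    (hadj : ∀ x y, y ∈ adj.getD x [] ↔ (x ∈ P ∧ y ∈ d.getD x [] ∧ y ∈ P)) :
    (((radj.getD v []).foldl
        (fun a u => if a.contains u then a.modify u [] (fun l => l ++ [v]) else a)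
        ((d.getD v []).foldl
          (fun a u => if a.contains u then a.modify v [] (fun l => l ++ [u]) else a)
          (adj.insert v ([] : List Int)))).keys = P ++ [v]) ∧
    (∀ x y, y ∈ ((radj.getD v []).foldl
        (fun a u => if a.contains u then a.modify u [] (fun l => l ++ [v]) else a)
        ((d.getD v []).foldl
          (fun a u => if a.contains u then a.modify v [] (fun l => l ++ [u]) else a)
          (adj.insert v ([] : List Int)))).getD x [] ↔
      (x ∈ P ++ [v] ∧ y ∈ d.getD x [] ∧ y ∈ P ++ [v])) := by
  have hcv0 : adj.contains v = false := by
    rw [← Bool.not_eq_true, PySem.Dict.contains_iff_mem_keys, hk]; exact hvP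
  set adj1 := adj.insert v ([] : List Int) with hadj1
  have hk1 : adj1.keys = P ++ [v] := by
    rw [hadj1, PySem.Dict.keys_insert_of_not_contains adj _ hcv0, hk]
  have hc1 : ∀ z, adj1.contains z = true ↔ z ∈ P ++ [v] := by
    intro z; rw [PySem.Dict.contains_iff_mem_keys, hk1]
  have hg1 : ∀ x, adj1.getD x [] = if x = v then [] else adj.getD x [] := by
    intro x; rw [PySem.Dict.getD_insert]
  have hv1 : adj1.contains v = true := (hc1 v).2 (by simp)
  set adj2 := (d.getD v []).foldl
      (fun a u => if a.contains u then a.modify v [] (fun l => l ++ [u]) else a) adj1 with hadj2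
  have hk2 : adj2.keys = P ++ [v] := by rw [hadj2, pvSelfFold_keys v _ adj1 hv1, hk1]
  have hc2 : ∀ z, adj2.contains z = true ↔ z ∈ P ++ [v] := by
    intro z; rw [PySem.Dict.contains_iff_mem_keys, hk2]
  have hg2 : ∀ x y, y ∈ adj2.getD x [] ↔
      (y ∈ adj1.getD x [] ∨ (x = v ∧ y ∈ d.getD v [] ∧ adj1.contains y = true)) := by
    intro x y; rw [hadj2, pvSelfFold_mem v _ adj1 hv1]
  set adj3 := (radj.getD v []).foldl
      (fun a u => if a.contains u then a.modify u [] (fun l => l ++ [v]) else a) adj2 with hadj3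
  have hk3 : adj3.keys = P ++ [v] := by rw [hadj3, pvAppendFold_keys, hk2]
  have hg3 : ∀ x y, y ∈ adj3.getD x [] ↔
      (y ∈ adj2.getD x [] ∨ (y = v ∧ x ∈ radj.getD v [] ∧ adj2.contains x = true)) := by
    intro x y; rw [hadj3, pvAppendFold_mem]
  refine ⟨hk3, ?_⟩
  intro x y
  rw [hg3, hg2, hg1]
  constructor
  · rintro ((h | ⟨hx, hy, hcy⟩) | ⟨hyv, hxr, hcx⟩)
    · by_cases hx : x = v
      · rw [if_pos hx] at h; exact absurd h (List.not_mem_nil)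
      · rw [if_neg hx] at h
        have := (hadj x y).1 h
        exact ⟨List.mem_append_left _ this.1, this.2.1, List.mem_append_left _ this.2.2⟩
    · subst hx
      exact ⟨List.mem_append_right _ (by simp), hy, (hc1 y).1 hcy⟩
    · exact ⟨(hc2 x).1 hcx, hyv ▸ ((hradj x v).1 hxr).2.2,
        hyv ▸ List.mem_append_right _ (by simp)⟩
  · rintro ⟨hx, hy, hyP⟩
    rcases List.mem_append.1 hx with hxP | hxv
    · have hxv : x ≠ v := fun h => hvP (h ▸ hxP)
      rcases List.mem_append.1 hyP with hyP | hyv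
      · exact Or.inl (Or.inl (by rw [if_neg hxv]; exact (hadj x y).2 ⟨hxP, hy, hyP⟩))
      · have hyv : y = v := by simpa using hyv
        exact Or.inr ⟨hyv, (hradj x v).2 ⟨hvo, hPo x hxP, hyv ▸ hy⟩,
          (hc2 x).2 (List.mem_append_left _ hxP)⟩
    · have hxv : x = v := by simpa using hxv
      subst hxv
      exact Or.inl (Or.inr ⟨rfl, hy, (hc1 y).2 hyP⟩)

def pvStepR (d : PySem.Dict Int (List Int)) (P : List Int) (a b : Int) : Prop :=
  b ∈ d.getD a [] ∧ b ∈ P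

def pvReach (d : PySem.Dict Int (List Int)) (P : List Int) : Int → Int → Prop :=
  Relation.ReflTransGen (pvStepR d P)

def pvBit (c : Int → Bool) (v w : Int) : Int := if c w = c v then 0 else 1

def pvParSpec (d : PySem.Dict Int (List Int)) (P : List Int) (v : Int) (c : Int → Bool)
    (par : PySem.Dict Int Int) : Prop :=
  par.keys.Nodup ∧ (∀ w, w ∈ par.keys ↔ pvReach d P v w) ∧
    (∀ w ∈ par.keys, par.getD w 0 = pvBit c v w) ∧ (∀ w ∈ par.keys, w ∈ P)

def pvUsedPred (d : PySem.Dict Int (List Int)) (P : List Int) (col : PySem.Dict Int Int)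
    (v : Int) (c : Int → Bool) (k : Int) : Prop :=
  ∃ u, pvReach d P v u ∧ pvBit c v u = 1 ∧ col.contains u = true ∧ k = col.getD u 0

lemma pvPar_get (par : PySem.Dict Int Int) (hnd : par.keys.Nodup) (u : Int) (hu : u ∈ par.keys) :
    (u, par.getD u 0) ∈ par.items := by
  cases h : par.get? u with
  | none =>
    exact absurd ((PySem.Dict.get?_eq_none_iff_not_mem_keys par u).1 h) (by exact fun hh => hh hu)
  | some w =>
    have := PySem.Dict.getD_of_get?_eq_some par (d0 := 0) h
    rw [this]
    exact (PySem.Dict.get?_eq_some_iff_mem_items par u w hnd).1 h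

lemma pvUsedA_mem (d : PySem.Dict Int (List Int)) (P : List Int) (v : Int) (c : Int → Bool)
    (col par : PySem.Dict Int Int) (hspec : pvParSpec d P v c par) :
    ∀ k, k ∈ PySem.Set.ofList
        (((PySem.Set.ofList ((par.items.filter (fun p => p.2 == 1)).map Prod.fst)).filter
          (fun u => col.contains u)).map (fun u => col.getD u 0)) ↔
      pvUsedPred d P col v c k := by
  intro k
  obtain ⟨hnd, hreach, hbit, hP⟩ := hspec
  rw [PySem.Set.mem_ofList, List.mem_map]
  constructor
  · rintro ⟨u, hu, rfl⟩
    rw [List.mem_filter] at hu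
    obtain ⟨hu1, hu2⟩ := hu
    rw [PySem.Set.mem_ofList, List.mem_map] at hu1
    obtain ⟨p, hp, rfl⟩ := hu1
    rw [List.mem_filter] at hp
    obtain ⟨hpmem, hp1⟩ := hp
    have hkeys := PySem.Dict.mem_keys_of_mem_items _ hpmem
    have hget := PySem.Dict.getD_of_mem_items _ hpmem hnd 0
    have hp2 : p.2 = 1 := by simpa using hp1
    refine ⟨p.1, (hreach p.1).1 hkeys, ?_, hu2, rfl⟩
    rw [← hbit p.1 hkeys, hget, hp2]
  · rintro ⟨u, hre, hb, hc, rfl⟩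
    have hk : u ∈ par.keys := (hreach u).2 hre
    refine ⟨u, ?_, rfl⟩
    rw [List.mem_filter]
    refine ⟨?_, hc⟩
    rw [PySem.Set.mem_ofList, List.mem_map]
    refine ⟨(u, par.getD u 0), ?_, rfl⟩
    rw [List.mem_filter]
    refine ⟨pvPar_get par hnd u hk, ?_⟩
    rw [hbit u hk, hb]
    rfl

lemma pvUsedB_fold_mem (col : PySem.Dict Int Int) :
    ∀ (items : List (Int × Int)) (s : PySem.Set Int) (k : Int),
      k ∈ items.foldl
        (fun s p =>
          if p.2 == 1 && col.contains p.1 then PySem.Set.add s (col.getD p.1 0) else s) s ↔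
      (k ∈ s ∨ ∃ p ∈ items, (p.2 == 1 && col.contains p.1) = true ∧ k = col.getD p.1 0) := by
  intro items
  induction items with
  | nil => intro s k; simp
  | cons p rest ih =>
    intro s k
    simp only [List.foldl_cons]
    by_cases hc : (p.2 == 1 && col.contains p.1) = true
    · rw [hc]
      simp only [if_true]
      rw [ih]
      simp only [PySem.Set.mem_add, List.mem_cons]
      constructor
      · rintro ((h | h) | ⟨q, hq, h1, h2⟩)
        · exact Or.inl h
        · exact Or.inr ⟨p, Or.inl rfl, hc, h⟩
        · exact Or.inr ⟨q, Or.inr hq, h1, h2⟩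
      · rintro (h | ⟨q, hq | hq, h1, h2⟩)
        · exact Or.inl (Or.inl h)
        · exact Or.inl (Or.inr (by rw [hq] at h2; exact h2))
        · exact Or.inr ⟨q, hq, h1, h2⟩
    · rw [Bool.not_eq_true] at hc
      rw [hc]
      simp only [Bool.false_eq_true, if_false]
      rw [ih]
      simp only [List.mem_cons]
      constructor
      · rintro (h | ⟨q, hq, h1, h2⟩)
        · exact Or.inl h
        · exact Or.inr ⟨q, Or.inr hq, h1, h2⟩
      · rintro (h | ⟨q, hq | hq, h1, h2⟩)
        · exact Or.inl h
        · rw [hq] at h1; rw [hc] at h1; exact absurd h1 (by simp)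
        · exact Or.inr ⟨q, hq, h1, h2⟩

lemma pvUsedB_mem (d : PySem.Dict Int (List Int)) (P : List Int) (v : Int) (c : Int → Bool)
    (col par : PySem.Dict Int Int) (hspec : pvParSpec d P v c par) :
    ∀ k, k ∈ par.items.foldl
        (fun s p =>
          if p.2 == 1 && col.contains p.1 then PySem.Set.add s (col.getD p.1 0) else s)
        PySem.Set.empty ↔ pvUsedPred d P col v c k := by
  intro k
  obtain ⟨hnd, hreach, hbit, hP⟩ := hspec
  rw [pvUsedB_fold_mem]
  constructor
  · rintro (h | ⟨p, hp, h1, h2⟩)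
    · exact absurd h (by simp [PySem.Set.empty])
    · have hkeys := PySem.Dict.mem_keys_of_mem_items _ hp
      have hget := PySem.Dict.getD_of_mem_items _ hp hnd 0
      rw [Bool.and_eq_true] at h1
      have hp2 : p.2 = 1 := by simpa using h1.1
      exact ⟨p.1, (hreach p.1).1 hkeys, by rw [← hbit p.1 hkeys, hget, hp2], h1.2, h2⟩
  · rintro ⟨u, hre, hb, hc, rfl⟩
    have hk : u ∈ par.keys := (hreach u).2 hre
    refine Or.inr ⟨(u, par.getD u 0), pvPar_get par hnd u hk, ?_, rfl⟩
    rw [Bool.and_eq_true]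
    refine ⟨?_, hc⟩
    rw [hbit u hk, hb]
    rfl

lemma pvUsedB_nodup (col : PySem.Dict Int Int) (items : List (Int × Int)) :
    ∀ (s : PySem.Set Int), s.Nodup →
    (items.foldl
      (fun s p =>
        if p.2 == 1 && col.contains p.1 then PySem.Set.add s (col.getD p.1 0) else s) s).Nodup := by
  induction items with
  | nil => intro s hs; exact hs
  | cons p rest ih =>
    intro s hs
    simp only [List.foldl_cons]
    by_cases hc : (p.2 == 1 && col.contains p.1) = true
    · rw [hc]; simp only [if_true]; exact ih _ (PySem.Set.nodup_add s _ hs)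
    · rw [Bool.not_eq_true] at hc; rw [hc]; simp only [Bool.false_eq_true, if_false]; exact ih s hs

lemma pvBit_flip (c : Int → Bool) (v x y : Int) (h : c x ≠ c y) :
    pvBit c v y = 1 - pvBit c v x := by
  unfold pvBit
  rcases Bool.eq_false_or_eq_true (c x) with hx | hx <;>
    rcases Bool.eq_false_or_eq_true (c y) with hy | hy <;>
      simp [hx, hy] at h ⊢ <;>
        rcases Bool.eq_false_or_eq_true (c v) with hv | hv <;> simp [hv]

lemma pvBfsFold_none (x : Int) : ∀ ns : List Int,
    ns.foldl
      (fun st y =>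
        match st with
        | none => none
        | some (q, p) =>
          let expected := 1 - p.getD x 0
          if p.contains y then
            if p.getD y 0 ≠ expected then none else some (q, p)
          else some (q ++ [y], p.insert y expected))
      (none : Option (List Int × PySem.Dict Int Int)) = none := by
  intro ns
  induction ns with
  | nil => rfl
  | cons y rest ih => simpa using ih

lemma pvBfsScan_cons_eq (par : PySem.Dict Int Int) (x : Int) (q : List Int) (y : Int)
    (ns : List Int) :
    pvBfsScan par x q (y :: ns) =
      if par.contains y = true then
        (if par.getD y 0 ≠ 1 - par.getD x 0 then none else pvBfsScan par x q ns)
      else pvBfsScan (par.insert y (1 - par.getD x 0)) x (q ++ [y]) ns := by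
  by_cases hc : par.contains y = true
  · rw [if_pos hc]
    by_cases hf : par.getD y 0 ≠ 1 - par.getD x 0
    · rw [if_pos hf]
      show List.foldl _ _ (y :: ns) = none
      rw [List.foldl_cons]
      have : (match (some (q, par) : Option (List Int × PySem.Dict Int Int)) with
        | none => none
        | some (q, p) =>
          let expected := 1 - p.getD x 0
          if p.contains y then
            if p.getD y 0 ≠ expected then none else some (q, p)
          else some (q ++ [y], p.insert y expected)) =
          (none : Option (List Int × PySem.Dict Int Int)) := by
        simp only [hc, if_true, if_pos hf]
      rw [this]
      exact pvBfsFold_none x ns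
    · rw [if_neg hf]
      show List.foldl _ _ (y :: ns) = _
      rw [List.foldl_cons]
      congr 1
      simp only [hc, if_true, if_neg hf]
  · rw [if_neg hc]
    show List.foldl _ _ (y :: ns) = _
    rw [List.foldl_cons]
    congr 1
    rw [Bool.not_eq_true] at hc
    simp only [hc, Bool.false_eq_true, if_false]

lemma pvBfsScan_spec (d : PySem.Dict Int (List Int)) (P : List Int) (c : Int → Bool)
    (hproper : ∀ x y, x ∈ P → y ∈ P → y ∈ d.getD x [] → c x ≠ c y)
    (v x : Int) :
    ∀ (ns q : List Int) (par : PySem.Dict Int Int),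
      (∀ y ∈ ns, y ∈ d.getD x [] ∧ y ∈ P) →
      x ∈ par.keys →
      par.keys.Nodup →
      (∀ w ∈ par.keys, w ∈ P) →
      (∀ w ∈ par.keys, par.getD w 0 = pvBit c v w) →
      ∃ new par',
        pvBfsScan par x q ns = some (q ++ new, par') ∧
        par'.keys = par.keys ++ new ∧
        new.Nodup ∧ (∀ y ∈ new, y ∉ par.keys ∧ y ∈ ns) ∧
        (∀ w ∈ par'.keys, par'.getD w 0 = pvBit c v w) ∧
        (∀ y ∈ ns, y ∈ par'.keys) := by
  intro ns
  induction ns with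
  | nil =>
    intro q par _ _ hnd _ hbit
    exact ⟨[], par, by simp [pvBfsScan], by simp, List.nodup_nil, by simp, hbit, by simp⟩
  | cons y rest ih =>
    intro q par hns hx hnd hkP hbit
    have hyd : y ∈ d.getD x [] := (hns y (by simp)).1
    have hyP : y ∈ P := (hns y (by simp)).2
    have hflip : pvBit c v y = 1 - pvBit c v x :=
      pvBit_flip c v x y (hproper x y (hkP x hx) hyP hyd)
    rw [pvBfsScan_cons_eq]
    by_cases hc : par.contains y = true
    · rw [if_pos hc]
      have hykeys : y ∈ par.keys := (PySem.Dict.contains_iff_mem_keys par y).1 hc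
      have hnoc : ¬(par.getD y 0 ≠ 1 - par.getD x 0) := by
        rw [hbit y hykeys, hbit x hx, hflip]
        simp
      rw [if_neg hnoc]
      obtain ⟨new, par', h1, h2, h3, h4, h5, h6⟩ :=
        ih q par (fun z hz => hns z (by simp [hz])) hx hnd hkP hbit
      refine ⟨new, par', h1, h2, h3, fun z hz => ⟨(h4 z hz).1, by simp [(h4 z hz).2]⟩, h5, ?_⟩
      intro z hz
      rcases List.mem_cons.1 hz with hz | hz
      · subst hz; rw [h2]; exact List.mem_append_left _ hykeys
      · exact h6 z hz
    · rw [if_neg hc]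
      have hynk : y ∉ par.keys := fun hm =>
        hc ((PySem.Dict.contains_iff_mem_keys par y).2 hm)
      set par1 := par.insert y (1 - par.getD x 0) with hpar1
      have hk1 : par1.keys = par.keys ++ [y] := by
        rw [hpar1, PySem.Dict.keys_insert_of_not_contains par _ (by
          rw [← Bool.not_eq_true]; exact hc)]
      have hnd1 : par1.keys.Nodup := by
        rw [hk1]
        exact List.Nodup.append hnd (List.nodup_singleton y)
          (fun a ha hb => by rw [List.mem_singleton] at hb; exact hynk (hb ▸ ha))
      have hx1 : x ∈ par1.keys := by rw [hk1]; exact List.mem_append_left _ hx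
      have hkP1 : ∀ w ∈ par1.keys, w ∈ P := by
        intro w hw
        rw [hk1, List.mem_append, List.mem_singleton] at hw
        rcases hw with hw | hw
        · exact hkP w hw
        · exact hw ▸ hyP
      have hbit1 : ∀ w ∈ par1.keys, par1.getD w 0 = pvBit c v w := by
        intro w hw
        rw [hk1, List.mem_append, List.mem_singleton] at hw
        rcases hw with hw | hw
        · have hwy : w ≠ y := fun h => hynk (h ▸ hw)
          rw [hpar1, PySem.Dict.getD_insert_of_ne par _ _ hwy, hbit w hw]
        · subst hw
          rw [hpar1, PySem.Dict.getD_insert_self, ← hbit x hx] at *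
          rw [hflip, hbit x hx]
      obtain ⟨new, par', h1, h2, h3, h4, h5, h6⟩ :=
        ih (q ++ [y]) par1 (fun z hz => hns z (by simp [hz])) hx1 hnd1 hkP1 hbit1
      refine ⟨y :: new, par', ?_, ?_, ?_, ?_, h5, ?_⟩
      · rw [h1, List.append_assoc]; rfl
      · rw [h2, hk1, List.append_assoc]; rfl
      · refine List.Nodup.cons (fun hy => ?_) h3
        have := (h4 y hy).1
        rw [hk1] at this
        exact this (List.mem_append_right _ (by simp))
      · intro z hz
        rcases List.mem_cons.1 hz with hz | hz
        · exact ⟨hz ▸ hynk, by simp [hz]⟩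
        · have := h4 z hz
          rw [hk1] at this
          exact ⟨fun hm => this.1 (List.mem_append_left _ hm), by simp [this.2]⟩
      · intro z hz
        rcases List.mem_cons.1 hz with hz | hz
        · subst hz
          rw [h2, hk1]
          exact List.mem_append_left _ (List.mem_append_right _ (by simp))
        · exact h6 z hz

lemma pvBfs_spec (d : PySem.Dict Int (List Int)) (P : List Int) (c : Int → Bool)
    (hproper : ∀ x y, x ∈ P → y ∈ P → y ∈ d.getD x [] → c x ≠ c y)
    (v : Int) (pg : PySem.Dict Int (List Int))
    (hpg : ∀ x ∈ P, ∀ y, y ∈ pg.getD x [] ↔ (y ∈ d.getD x [] ∧ y ∈ P)) :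
    ∀ (fuel : Nat) (q : List Int) (par : PySem.Dict Int Int),
      par.keys.Nodup → q.Nodup → (∀ a ∈ q, a ∈ par.keys) →
      (∀ w ∈ par.keys, w ∈ P) →
      (∀ w ∈ par.keys, pvReach d P v w) →
      (∀ w ∈ par.keys, par.getD w 0 = pvBit c v w) →
      (∀ w ∈ par.keys, w ∉ q → ∀ y, y ∈ d.getD w [] → y ∈ P → y ∈ par.keys) →
      v ∈ par.keys →
      q.length + 2 * P.length < fuel + 2 * par.keys.length →
      ∃ parF, pvBfs pg fuel q par = some parF ∧ pvParSpec d P v c parF := by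
  intro fuel
  induction fuel with
  | zero =>
    intro q par hnd _ _ hkP _ _ _ _ hmeas
    have hle : par.keys.length ≤ P.length :=
      (List.subperm_of_subset hnd (fun a ha => hkP a ha)).length_le
    omega
  | succ fuel ih =>
    intro q par hnd hqnd hq hkP hreach hbit hclo hv hmeas
    match q with
    | [] =>
      refine ⟨par, rfl, hnd, ?_, hbit, hkP⟩
      intro w
      constructor
      · exact hreach w
      · intro hw
        unfold pvReach at hw
        induction hw with
        | refl => exact hv
        | tail hab hbc ihw =>
          exact hclo _ ihw (by simp) _ hbc.1 hbc.2
    | x :: q =>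
      have hx : x ∈ par.keys := hq x (by simp)
      have hxP : x ∈ P := hkP x hx
      have hns : ∀ y ∈ pg.getD x [], y ∈ d.getD x [] ∧ y ∈ P :=
        fun y hy => (hpg x hxP y).1 hy
      obtain ⟨new, par', h1, h2, h3, h4, h5, h6⟩ :=
        pvBfsScan_spec d P c hproper v x (pg.getD x []) q par hns hx hnd hkP hbit
      have hstep : pvBfs pg (fuel+1) (x :: q) par = pvBfs pg fuel (q ++ new) par' := by
        show (match pvBfsScan par x q (pg.getD x []) with
          | none => none
          | some (q, par') => pvBfs pg fuel q par') = _
        rw [h1]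
      rw [hstep]
      have hqnd' : q.Nodup := (List.nodup_cons.1 hqnd).2
      have hxq : x ∉ q := (List.nodup_cons.1 hqnd).1
      have hnewP : ∀ z ∈ new, z ∈ P := fun z hz => (hns z (h4 z hz).2).2
      apply ih (q ++ new) par'
      · rw [h2]
        exact List.Nodup.append hnd h3 (fun a ha hb => (h4 a hb).1 ha)
      · exact List.Nodup.append hqnd' h3
          (fun a ha hb => (h4 a hb).1 (hq a (by simp [ha])))
      · intro a ha
        rw [h2]
        rcases List.mem_append.1 ha with ha | ha
        · exact List.mem_append_left _ (hq a (by simp [ha]))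
        · exact List.mem_append_right _ ha
      · intro w hw
        rw [h2] at hw
        rcases List.mem_append.1 hw with hw | hw
        · exact hkP w hw
        · exact hnewP w hw
      · intro w hw
        rw [h2] at hw
        rcases List.mem_append.1 hw with hw | hw
        · exact hreach w hw
        · exact Relation.ReflTransGen.tail (hreach x hx) ⟨(hns w (h4 w hw).2).1, hnewP w hw⟩
      · exact h5
      · intro w hw hwq y hyd hyP
        rw [h2] at hw
        rcases List.mem_append.1 hw with hw | hw
        · by_cases hwx : w = x
          · subst hwx
            rw [h2]
            have : y ∈ pg.getD w [] := (hpg w hxP y).2 ⟨hyd, hyP⟩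
            rw [← h2]
            exact h6 y this
          · have : w ∉ q := fun hm => hwq (List.mem_append_left _ hm)
            have hwxq : w ∉ x :: q := by simp [hwx, this]
            rw [h2]
            exact List.mem_append_left _ (hclo w hw hwxq y hyd hyP)
        · exact absurd (List.mem_append_right q hw) hwq
      · rw [h2]
        exact List.mem_append_left _ hv
      · rw [h2, List.length_append, List.length_append]
        simp only [List.length_cons] at hmeas
        omega

lemma pvDfsScan_spec (d : PySem.Dict Int (List Int)) (P : List Int) (c : Int → Bool)
    (hproper : ∀ x y, x ∈ P → y ∈ P → y ∈ d.getD x [] → c x ≠ c y)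
    (v x : Int) (opposite : Int) (hopp : opposite = 1 - pvBit c v x) (hxP : x ∈ P) :
    ∀ (ns stack : List Int) (par : PySem.Dict Int Int),
      (∀ y ∈ ns, y ∈ d.getD x [] ∧ y ∈ P) →
      par.keys.Nodup →
      (∀ w ∈ par.keys, par.getD w 0 = pvBit c v w) →
      ∃ new,
        (ns.foldl
          (fun (st : List Int × PySem.Dict Int Int) y =>
            if st.2.contains y then st else (y :: st.1, st.2.insert y opposite))
          (stack, par)).1 = new.reverse ++ stack ∧
        ((ns.foldl
          (fun (st : List Int × PySem.Dict Int Int) y =>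
            if st.2.contains y then st else (y :: st.1, st.2.insert y opposite))
          (stack, par)).2).keys = par.keys ++ new ∧
        new.Nodup ∧ (∀ y ∈ new, y ∉ par.keys ∧ y ∈ ns) ∧
        (∀ w ∈ par.keys ++ new,
          ((ns.foldl
            (fun (st : List Int × PySem.Dict Int Int) y =>
              if st.2.contains y then st else (y :: st.1, st.2.insert y opposite))
            (stack, par)).2).getD w 0 = pvBit c v w) ∧
        (∀ y ∈ ns, y ∈ par.keys ++ new) := by
  intro ns
  induction ns with
  | nil =>
    intro stack par _ _ hbit
    exact ⟨[], by simp, by simp, List.nodup_nil, by simp, by simpa using hbit, by simp⟩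
  | cons y rest ih =>
    intro stack par hns hnd hbit
    have hyd : y ∈ d.getD x [] := (hns y (by simp)).1
    have hyP : y ∈ P := (hns y (by simp)).2
    have hflip : pvBit c v y = 1 - pvBit c v x :=
      pvBit_flip c v x y (hproper x y hxP hyP hyd)
    simp only [List.foldl_cons]
    by_cases hc : par.contains y = true
    · rw [if_pos hc]
      have hykeys : y ∈ par.keys := (PySem.Dict.contains_iff_mem_keys par y).1 hc
      obtain ⟨new, h1, h2, h3, h4, h5, h6⟩ :=
        ih stack par (fun z hz => hns z (by simp [hz])) hnd hbit
      refine ⟨new, h1, h2, h3, fun z hz => ⟨(h4 z hz).1, by simp [(h4 z hz).2]⟩, h5, ?_⟩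
      intro z hz
      rcases List.mem_cons.1 hz with hz | hz
      · subst hz; exact List.mem_append_left _ hykeys
      · exact h6 z hz
    · rw [if_neg hc]
      have hynk : y ∉ par.keys := fun hm =>
        hc ((PySem.Dict.contains_iff_mem_keys par y).2 hm)
      set par1 := par.insert y opposite with hpar1
      have hk1 : par1.keys = par.keys ++ [y] := by
        rw [hpar1, PySem.Dict.keys_insert_of_not_contains par _ (by
          rw [← Bool.not_eq_true]; exact hc)]
      have hnd1 : par1.keys.Nodup := by
        rw [hk1]
        exact List.Nodup.append hnd (List.nodup_singleton y)
          (fun a ha hb => by rw [List.mem_singleton] at hb; exact hynk (hb ▸ ha))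
      have hbit1 : ∀ w ∈ par1.keys, par1.getD w 0 = pvBit c v w := by
        intro w hw
        rw [hk1, List.mem_append, List.mem_singleton] at hw
        rcases hw with hw | hw
        · have hwy : w ≠ y := fun h => hynk (h ▸ hw)
          rw [hpar1, PySem.Dict.getD_insert_of_ne par _ _ hwy, hbit w hw]
        · subst hw
          rw [hpar1, PySem.Dict.getD_insert_self, hopp, hflip]
      obtain ⟨new, h1, h2, h3, h4, h5, h6⟩ :=
        ih (y :: stack) par1 (fun z hz => hns z (by simp [hz])) hnd1 hbit1
      refine ⟨y :: new, ?_, ?_, ?_, ?_, ?_, ?_⟩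
      · rw [h1]; simp
      · rw [h2, hk1, List.append_assoc]; rfl
      · refine List.Nodup.cons (fun hy => ?_) h3
        have := (h4 y hy).1
        rw [hk1] at this
        exact this (List.mem_append_right _ (by simp))
      · intro z hz
        rcases List.mem_cons.1 hz with hz | hz
        · exact ⟨hz ▸ hynk, by simp [hz]⟩
        · have := h4 z hz
          rw [hk1] at this
          exact ⟨fun hm => this.1 (List.mem_append_left _ hm), by simp [this.2]⟩
      · intro w hw
        apply h5
        rw [hk1]
        simp only [List.mem_append, List.mem_cons, List.mem_singleton] at hw ⊢
        tauto
      · intro z hz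
        rcases List.mem_cons.1 hz with hz | hz
        · subst hz
          exact List.mem_append_right _ (by simp)
        · have := h6 z hz
          rw [hk1] at this
          simp only [List.mem_append, List.mem_cons, List.mem_singleton] at this ⊢
          tauto

lemma pvDfs_spec (d : PySem.Dict Int (List Int)) (P : List Int) (c : Int → Bool)
    (hproper : ∀ x y, x ∈ P → y ∈ P → y ∈ d.getD x [] → c x ≠ c y)
    (v : Int) (adj : PySem.Dict Int (List Int))
    (hadj : ∀ x ∈ P, ∀ y, y ∈ adj.getD x [] ↔ (y ∈ d.getD x [] ∧ y ∈ P)) :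
    ∀ (fuel : Nat) (stack : List Int) (par : PySem.Dict Int Int),
      par.keys.Nodup → stack.Nodup → (∀ a ∈ stack, a ∈ par.keys) →
      (∀ w ∈ par.keys, w ∈ P) →
      (∀ w ∈ par.keys, pvReach d P v w) →
      (∀ w ∈ par.keys, par.getD w 0 = pvBit c v w) →
      (∀ w ∈ par.keys, w ∉ stack → ∀ y, y ∈ d.getD w [] → y ∈ P → y ∈ par.keys) →
      v ∈ par.keys →
      stack.length + 2 * P.length < fuel + 2 * par.keys.length →
      pvParSpec d P v c (pvDfs adj fuel stack par) := by
  intro fuel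
  induction fuel with
  | zero =>
    intro stack par hnd _ _ hkP _ _ _ _ hmeas
    have hle : par.keys.length ≤ P.length :=
      (List.subperm_of_subset hnd (fun a ha => hkP a ha)).length_le
    omega
  | succ fuel ih =>
    intro stack par hnd hqnd hq hkP hreach hbit hclo hv hmeas
    match stack with
    | [] =>
      refine ⟨hnd, ?_, hbit, hkP⟩
      intro w
      constructor
      · exact hreach w
      · intro hw
        unfold pvReach at hw
        induction hw with
        | refl => exact hv
        | tail hab hbc ihw =>
          exact hclo _ ihw (by simp) _ hbc.1 hbc.2
    | x :: stack =>
      have hx : x ∈ par.keys := hq x (by simp)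
      have hxP : x ∈ P := hkP x hx
      have hns : ∀ y ∈ adj.getD x [], y ∈ d.getD x [] ∧ y ∈ P :=
        fun y hy => (hadj x hxP y).1 hy
      have hopp : 1 - par.getD x 0 = 1 - pvBit c v x := by rw [hbit x hx]
      obtain ⟨new, h1, h2, h3, h4, h5, h6⟩ :=
        pvDfsScan_spec d P c hproper v x (1 - par.getD x 0) hopp hxP
          (adj.getD x []) stack par hns hnd hbit
      have hstep : pvDfs adj (fuel+1) (x :: stack) par =
          pvDfs adj fuel
            ((adj.getD x []).foldl
              (fun (st : List Int × PySem.Dict Int Int) y =>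
                if st.2.contains y then st else (y :: st.1, st.2.insert y (1 - par.getD x 0)))
              (stack, par)).1
            ((adj.getD x []).foldl
              (fun (st : List Int × PySem.Dict Int Int) y =>
                if st.2.contains y then st else (y :: st.1, st.2.insert y (1 - par.getD x 0)))
              (stack, par)).2 := rfl
      rw [hstep, h1]
      set par' := ((adj.getD x []).foldl
        (fun (st : List Int × PySem.Dict Int Int) y =>
          if st.2.contains y then st else (y :: st.1, st.2.insert y (1 - par.getD x 0)))
        (stack, par)).2 with hpar'
      have hqnd' : stack.Nodup := (List.nodup_cons.1 hqnd).2
      have hnewP : ∀ z ∈ new, z ∈ P := fun z hz => (hns z (h4 z hz).2).2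
      apply ih (new.reverse ++ stack) par'
      · rw [h2]
        exact List.Nodup.append hnd h3 (fun a ha hb => (h4 a hb).1 ha)
      · exact List.Nodup.append (by simpa using h3) hqnd'
          (fun a ha hb => (h4 a (by simpa using ha)).1 (hq a (by simp [hb])))
      · intro a ha
        rw [h2]
        rcases List.mem_append.1 ha with ha | ha
        · exact List.mem_append_right _ (by simpa using ha)
        · exact List.mem_append_left _ (hq a (by simp [ha]))
      · intro w hw
        rw [h2] at hw
        rcases List.mem_append.1 hw with hw | hw
        · exact hkP w hw
        · exact hnewP w hw
      · intro w hw
        rw [h2] at hw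
        rcases List.mem_append.1 hw with hw | hw
        · exact hreach w hw
        · exact Relation.ReflTransGen.tail (hreach x hx) ⟨(hns w (h4 w hw).2).1, hnewP w hw⟩
      · exact fun w hw => h5 w (h2 ▸ hw)
      · intro w hw hwq y hyd hyP
        rw [h2] at hw
        rcases List.mem_append.1 hw with hw | hw
        · by_cases hwx : w = x
          · subst hwx
            rw [h2]
            have : y ∈ adj.getD w [] := (hadj w hxP y).2 ⟨hyd, hyP⟩
            exact h6 y this
          · have : w ∉ stack := fun hm => hwq (List.mem_append_right _ hm)
            have hwxq : w ∉ x :: stack := by simp [hwx, this]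
            rw [h2]
            exact List.mem_append_left _ (hclo w hw hwxq y hyd hyP)
        · exact absurd (List.mem_append_left _ (by simpa using hw)) hwq
      · rw [h2]
        exact List.mem_append_left _ hv
      · rw [h2, List.length_append, List.length_append, List.length_reverse]
        simp only [List.length_cons] at hmeas
        omega

lemma pvInduced_adj (d : PySem.Dict Int (List Int)) (P : List Int) (hnd : P.Nodup) :
    ∀ x ∈ P, ∀ y, y ∈ (pvInducedSubgraph d P P).getD x [] ↔ (y ∈ d.getD x [] ∧ y ∈ P) := by
  intro x hx y
  have hfresh : ∀ a ∈ P, (PySem.Dict.empty : PySem.Dict Int (List Int)).contains a = false := by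
    intro a _; exact PySem.Dict.contains_empty a
  have hmap : (P.map (fun a => a)).Nodup := by simpa using hnd
  have hitems := PySem.Dict.items_foldl_insert_fresh P (fun a => a)
      (fun a => (d.getD a []).filter (fun y => PySem.Set.contains P y))
      PySem.Dict.empty hfresh hmap
  have hkeys : (pvInducedSubgraph d P P).keys = P := by
    unfold pvInducedSubgraph
    rw [PySem.Dict.keys_foldl_insert]
    rw [PySem.Dict.keys_empty, PySem.Set.update_nil_left, PySem.Set.ofList_eq_self_of_nodup _ hnd]
  have hknd : (pvInducedSubgraph d P P).keys.Nodup := by rw [hkeys]; exact hnd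
  have hmem : (x, (d.getD x []).filter (fun y => PySem.Set.contains P y)) ∈ (pvInducedSubgraph d P P).items := by
    unfold pvInducedSubgraph
    rw [hitems]
    have : (PySem.Dict.empty : PySem.Dict Int (List Int)).items = [] := rfl
    rw [this, List.nil_append, List.mem_map]
    exact ⟨x, hx, rfl⟩
  have hgd := PySem.Dict.getD_of_mem_items _ hmem hknd []
  rw [hgd, List.mem_filter]
  simp [PySem.Set.contains_iff]

lemma pvContains_congr (u1 u2 : PySem.Set Int) (h : ∀ z, z ∈ u1 ↔ z ∈ u2) (z : Int) :
    PySem.Set.contains u1 z = PySem.Set.contains u2 z := by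
  by_cases hm : z ∈ u1
  · rw [(PySem.Set.contains_iff u1 z).2 hm, ((PySem.Set.contains_iff u2 z).2 ((h z).1 hm)).symm]
  · have hm2 : z ∉ u2 := fun hx => hm ((h z).2 hx)
    rw [Bool.eq_iff_iff.2 ⟨fun hx => absurd ((PySem.Set.contains_iff u1 z).1 hx) hm,
      fun hx => absurd ((PySem.Set.contains_iff u2 z).1 hx) hm2⟩]

lemma pvScanEq (u1 u2 : PySem.Set Int) (h : ∀ z, z ∈ u1 ↔ z ∈ u2) :
    ∀ (n : Nat) (color : Int), (∃ k : Nat, k < n ∧ (color + (k : Int)) ∉ u1) →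
      pvSmallestAvailable u1 n color =
        pvFirstFree u2 (PySem.List.pyRange color (color + (n : Int)) 1) := by
  intro n
  induction n with
  | zero =>
    intro color hex
    obtain ⟨k, hk, _⟩ := hex
    omega
  | succ m ih =>
    intro color hex
    have hcc : PySem.Set.contains u1 color = PySem.Set.contains u2 color :=
      pvContains_congr u1 u2 h color
    have hlt : color < color + ((m + 1 : Nat) : Int) := by push_cast; omega
    rw [PySem.List.pyRange_one_cons hlt]
    by_cases hm1 : color ∈ u1
    · have h1 : PySem.Set.contains u1 color = true := (PySem.Set.contains_iff u1 color).2 hm1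
      have h2 : PySem.Set.contains u2 color = true := by rw [← hcc]; exact h1
      simp only [pvSmallestAvailable, pvFirstFree, h1, h2, if_true]
      obtain ⟨k, hk, hfree⟩ := hex
      have hk0 : k ≠ 0 := by
        rintro rfl
        simp only [Nat.cast_zero, add_zero] at hfree
        exact hfree hm1
      obtain ⟨k', rfl⟩ := Nat.exists_eq_succ_of_ne_zero hk0
      have hfree' : ((color + 1) + (k' : Int)) ∉ u1 := by
        have : (color + 1) + (k' : Int) = color + ((k' + 1 : Nat) : Int) := by push_cast; ring
        rw [this]
        exact hfree
      have hre : color + ((m + 1 : Nat) : Int) = (color + 1) + (m : Int) := by push_cast; ring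
      rw [hre]
      exact ih (color + 1) ⟨k', by omega, hfree'⟩
    · have h1 : PySem.Set.contains u1 color = false := by
        rw [← Bool.not_eq_true]
        exact fun hx => hm1 ((PySem.Set.contains_iff u1 color).1 hx)
      have h2 : PySem.Set.contains u2 color = false := by rw [← hcc]; exact h1
      simp only [pvSmallestAvailable, pvFirstFree, h1, h2, Bool.false_eq_true, if_false]

lemma pvExistsFree (u : PySem.Set Int) (hnd : u.Nodup) :
    ∃ k : Nat, k < u.length + 1 ∧ ((1 : Int) + (k : Int)) ∉ u := by
  by_contra hcon
  push_neg at hcon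
  have hsub : ∀ a ∈ (List.range (u.length + 1)).map (fun k : Nat => (1 : Int) + (k : Int)), a ∈ u := by
    intro a ha
    rw [List.mem_map] at ha
    obtain ⟨k, hk, rfl⟩ := ha
    exact hcon k (List.mem_range.1 hk)
  have hndL : ((List.range (u.length + 1)).map (fun k : Nat => (1 : Int) + (k : Int))).Nodup := by
    refine List.Nodup.map ?_ List.nodup_range
    intro a b hab
    have hab' : (1 : Int) + (a : Int) = 1 + (b : Int) := hab
    omega
  have hle := (List.subperm_of_subset hndL hsub).length_le
  simp only [List.length_map, List.length_range] at hle
  omega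

lemma pvDictSize_keys (dd : PySem.Dict Int (List Int)) : dd.size = dd.keys.length := by
  simp [PySem.Dict.size, PySem.Dict.keys]

lemma pvPar0 (v : Int) :
    ((PySem.Dict.empty : PySem.Dict Int Int).insert v 0).keys = [v] := by
  rw [PySem.Dict.keys_insert_of_not_contains _ _ (PySem.Dict.contains_empty v),
    PySem.Dict.keys_empty, List.nil_append]

lemma pvTake_prefix : ∀ (P : List Int) (v : Int) (rest : List Int),
    (P ++ v :: rest).take (P.length + 1) = P ++ [v] := by
  intro P
  induction P with
  | nil => intro v rest; simp
  | cons a P ih =>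
    intro v rest
    simp only [List.cons_append, List.length_cons]
    rw [List.take_succ_cons, ih]

lemma pvGetD_prefix : ∀ (P : List Int) (v : Int) (rest : List Int),
    (P ++ v :: rest).getD P.length 0 = v := by
  intro P
  induction P with
  | nil => intro v rest; rfl
  | cons a P ih =>
    intro v rest
    simp only [List.cons_append, List.length_cons, List.getD_cons_succ]
    exact ih v rest

lemma pvOuter (d radj : PySem.Dict Int (List Int)) (order : List Int)
    (hradj : ∀ u y, u ∈ radj.getD y [] ↔ (y ∈ order ∧ u ∈ order ∧ y ∈ d.getD u []))
    (Hpre : ∀ (P1 : List Int) (v : Int) (rest1 : List Int), order = P1 ++ v :: rest1 →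
      ∃ S : List Int, List.Sublist S (P1 ++ [v]) ∧ v ∈ S ∧
        (∀ x ∈ S, ∀ y ∈ d.getD x [], y ∈ P1 ++ [v] → y ∈ S) ∧
        ∃ s : List Int, List.Sublist s S ∧ ∀ x ∈ S, ∀ y ∈ d.getD x [], y ∈ S → ((x ∈ s) ↔ y ∉ s)) :
    ∀ (todo P : List Int) (col : PySem.Dict Int Int) (adj : PySem.Dict Int (List Int)),
      order = P ++ todo → (P ++ todo).Nodup →
      adj.keys = P →
      (∀ x y, y ∈ adj.getD x [] ↔ (x ∈ P ∧ y ∈ d.getD x [] ∧ y ∈ P)) →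
      ∃ colF adjF,
        todo.foldl (pvStepA d) (some (col, P, P)) = some (colF, P ++ todo, P ++ todo) ∧
        todo.foldl (pvStepB d radj) (col, adj) = (colF, adjF) := by
  intro todo
  induction todo with
  | nil =>
    intro P col adj _ _ _ _
    exact ⟨col, adj, by simp, by simp⟩
  | cons v rest ih =>
    intro P col adj heq hnd hk hadj
    have hshift : P ++ v :: rest = (P ++ [v]) ++ rest := by simp
    rw [hshift] at hnd heq ⊢
    have hnd1 : (P ++ [v]).Nodup := (List.nodup_append.1 hnd).1
    have hvP : v ∉ P := by
      obtain ⟨-, -, hdisj⟩ := List.nodup_append.1 hnd1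
      exact fun hm => hdisj v hm v (by simp) rfl
    have hvo : v ∈ order := by
      rw [heq]; exact List.mem_append_left _ (List.mem_append_right _ (by simp))
    have hPo : ∀ a ∈ P, a ∈ order := by
      intro a ha
      rw [heq]; exact List.mem_append_left _ (List.mem_append_left _ ha)
    obtain ⟨S, hSsub, hvS, hSclo, s, hssub, hsprop⟩ :=
      Hpre P v rest (by rw [heq]; simp)
    have hSsubset : ∀ a ∈ S, a ∈ P ++ [v] := fun a ha => hSsub.subset ha
    have hSlen : S.length ≤ (P ++ [v]).length := hSsub.length_le
    set c : Int → Bool := fun z => decide (z ∈ s) with hc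
    have hproperS : ∀ x y, x ∈ S → y ∈ S → y ∈ d.getD x [] → c x ≠ c y := by
      intro x y hx hy hxy
      have h := hsprop x hx y hxy hy
      by_cases hxs : x ∈ s
      · have hys : y ∉ s := h.1 hxs
        simp [hc, hxs, hys]
      · have hys : y ∈ s := by by_contra hys; exact hxs (h.2 hys)
        simp [hc, hxs, hys]
    -- B's adjacency step
    obtain ⟨hk3, hg3⟩ := pvAdjStep d radj order P v hradj hPo hvo hvP adj hk hadj
    set adj3 := (radj.getD v []).foldl
      (fun a u => if a.contains u then a.modify u [] (fun l => l ++ [v]) else a)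
      ((d.getD v []).foldl
        (fun a u => if a.contains u then a.modify v [] (fun l => l ++ [u]) else a)
        (adj.insert v ([] : List Int))) with hadj3def
    -- shared start dict
    have hpar0k : ((PySem.Dict.empty : PySem.Dict Int Int).insert v 0).keys = [v] := pvPar0 v
    have hpar0nd : ((PySem.Dict.empty : PySem.Dict Int Int).insert v 0).keys.Nodup := by
      rw [hpar0k]; exact List.nodup_singleton v
    have hpar0mem : v ∈ ((PySem.Dict.empty : PySem.Dict Int Int).insert v 0).keys := by
      rw [hpar0k]; simp
    have hpar0bit : ∀ w ∈ ((PySem.Dict.empty : PySem.Dict Int Int).insert v 0).keys,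
        ((PySem.Dict.empty : PySem.Dict Int Int).insert v 0).getD w 0 = pvBit c v w := by
      intro w hw
      rw [hpar0k, List.mem_singleton] at hw
      subst hw
      rw [PySem.Dict.getD_insert_self]
      unfold pvBit
      rw [if_pos rfl]
    have hpar0P : ∀ w ∈ ((PySem.Dict.empty : PySem.Dict Int Int).insert v 0).keys, w ∈ S := by
      intro w hw
      rw [hpar0k, List.mem_singleton] at hw
      exact hw ▸ hvS
    have hpar0reach : ∀ w ∈ ((PySem.Dict.empty : PySem.Dict Int Int).insert v 0).keys,
        pvReach d S v w := by
      intro w hw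
      rw [hpar0k, List.mem_singleton] at hw
      exact hw ▸ Relation.ReflTransGen.refl
    have hpar0clo : ∀ w ∈ ((PySem.Dict.empty : PySem.Dict Int Int).insert v 0).keys,
        w ∉ [v] → ∀ y, y ∈ d.getD w [] → y ∈ S → y ∈ ((PySem.Dict.empty : PySem.Dict Int Int).insert v 0).keys := by
      intro w hw hwq
      rw [hpar0k] at hw
      exact absurd hw hwq
    -- A's BFS (over the edge-closed 2-colourable set S)
    have hpgS : ∀ x ∈ S, ∀ y,
        y ∈ (pvInducedSubgraph d (P ++ [v]) (P ++ [v])).getD x [] ↔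
          (y ∈ d.getD x [] ∧ y ∈ S) := by
      intro x hx y
      rw [pvInduced_adj d (P ++ [v]) hnd1 x (hSsubset x hx) y]
      constructor
      · rintro ⟨h1, h2⟩; exact ⟨h1, hSclo x hx y h1 h2⟩
      · rintro ⟨h1, h2⟩; exact ⟨h1, hSsubset y h2⟩
    obtain ⟨parA, hbfs, hspecA⟩ :=
      pvBfs_spec d S c hproperS v (pvInducedSubgraph d (P ++ [v]) (P ++ [v]))
        hpgS (2 * (P ++ [v]).length + 2) [v] (PySem.Dict.empty.insert v 0)
        hpar0nd (List.nodup_singleton v) (by intro a ha; rw [List.mem_singleton.1 ha]; exact hpar0mem)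
        hpar0P hpar0reach hpar0bit hpar0clo hpar0mem
        (by rw [hpar0k]; simp only [List.length_singleton]; omega)
    -- B's DFS (over the same set S)
    have hadjS : ∀ x ∈ S, ∀ y, y ∈ adj3.getD x [] ↔ (y ∈ d.getD x [] ∧ y ∈ S) := by
      intro x hx y
      rw [hg3]
      constructor
      · rintro ⟨h1, h2, h3⟩; exact ⟨h2, hSclo x hx y h2 h3⟩
      · rintro ⟨h1, h2⟩; exact ⟨hSsubset x hx, h1, hSsubset y h2⟩
    have hspecB := pvDfs_spec d S c hproperS v adj3 hadjS
      (2 * adj3.size + 2) [v] (PySem.Dict.empty.insert v 0)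
      hpar0nd (List.nodup_singleton v) (by intro a ha; rw [List.mem_singleton.1 ha]; exact hpar0mem)
      hpar0P hpar0reach hpar0bit hpar0clo hpar0mem
      (by rw [hpar0k, pvDictSize_keys, hk3]; simp only [List.length_singleton]; omega)
    set parB := pvDfs adj3 (2 * adj3.size + 2) [v] (PySem.Dict.empty.insert v 0) with hparB
    -- used sets agree
    set usedA := PySem.Set.ofList
      (((PySem.Set.ofList ((parA.items.filter (fun p => p.2 == 1)).map Prod.fst)).filter
        (fun u => col.contains u)).map (fun u => col.getD u 0)) with husedA
    set usedB := parB.items.foldl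
      (fun s p =>
        if p.2 == 1 && col.contains p.1 then PySem.Set.add s (col.getD p.1 0) else s)
      PySem.Set.empty with husedB
    have hmemiff : ∀ z, z ∈ usedA ↔ z ∈ usedB := by
      intro z
      rw [husedA, husedB, pvUsedA_mem d S v c col parA hspecA z,
        pvUsedB_mem d S v c col parB hspecB z]
    have hlen : usedA.length = usedB.length := by
      have hperm : usedA.Perm usedB := by
        rw [List.perm_ext_iff_of_nodup (by rw [husedA]; exact PySem.Set.nodup_ofList _)
          (by rw [husedB]; exact pvUsedB_nodup col parB.items PySem.Set.empty List.nodup_nil)]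
        exact hmemiff
      exact hperm.length_eq
    have hcolor : pvSmallestAvailable usedA (usedA.length + 1) 1 =
        pvFirstFree usedB (PySem.List.pyRange 1 ((usedB.length : Int) + 2) 1) := by
      have hndA : usedA.Nodup := by rw [husedA]; exact PySem.Set.nodup_ofList _
      rw [pvScanEq usedA usedB hmemiff (usedA.length + 1) 1 (pvExistsFree usedA hndA)]
      have hend : (1 : Int) + ((usedA.length + 1 : Nat) : Int) = (usedB.length : Int) + 2 := by
        rw [hlen]; push_cast; ring
      rw [hend]
    -- evaluate one A step
    have hstepA : pvStepA d (some (col, P, P)) v =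
        some (col.insert v (pvSmallestAvailable usedA (usedA.length + 1) 1), P ++ [v], P ++ [v]) := by
      show (match pvBfs (pvInducedSubgraph d (P ++ [v]) (PySem.Set.add P v))
          (2 * (P ++ [v]).length + 2) [v] (PySem.Dict.empty.insert v 0) with
        | none => none
        | some par =>
          some (col.insert v
            (pvSmallestAvailable
              (PySem.Set.ofList
                (((PySem.Set.ofList ((par.items.filter (fun p : Int × Int => p.2 == 1)).map Prod.fst)).filter
                  (fun u => col.contains u)).map (fun u => col.getD u 0)))
              ((PySem.Set.ofList
                (((PySem.Set.ofList ((par.items.filter (fun p : Int × Int => p.2 == 1)).map Prod.fst)).filter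
                  (fun u => col.contains u)).map (fun u => col.getD u 0))).length + 1) 1),
            P ++ [v], PySem.Set.add P v)) = _
      rw [PySem.Set.add_of_not_mem hvP, hbfs]
    -- evaluate one B step
    have hstepB : pvStepB d radj (col, adj) v =
        (col.insert v (pvFirstFree usedB (PySem.List.pyRange 1 ((usedB.length : Int) + 2) 1)), adj3) := by
      rfl
    rw [List.foldl_cons, List.foldl_cons, hstepA, hstepB, hcolor]
    exact ih (P ++ [v])
      (col.insert v (pvFirstFree usedB (PySem.List.pyRange 1 ((usedB.length : Int) + 2) 1))) adj3
      heq hnd hk3 hg3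

lemma pvFinal (graph : List (Int × List Int)) (hpre : Pre_cbip_coloring graph) :
    cbip_coloring graph = cbip_coloring_alt graph := by
  unfold Pre_cbip_coloring at hpre
  set d := PySem.Dict.ofList graph with hd
  set order := PySem.List.sorted d.keys (fun x => x) false with horderdef
  have hknd : d.keys.Nodup := PySem.Dict.nodup_keys_ofList graph
  have hond : order.Nodup := (PySem.List.sorted_perm d.keys (fun x => x) false).symm.nodup hknd
  have Hpre : ∀ (P1 : List Int) (v : Int) (rest1 : List Int), order = P1 ++ v :: rest1 →
      ∃ S : List Int, List.Sublist S (P1 ++ [v]) ∧ v ∈ S ∧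
        (∀ x ∈ S, ∀ y ∈ d.getD x [], y ∈ P1 ++ [v] → y ∈ S) ∧
        ∃ s : List Int, List.Sublist s S ∧ ∀ x ∈ S, ∀ y ∈ d.getD x [], y ∈ S → ((x ∈ s) ↔ y ∉ s) := by
    intro P1 v rest1 hsplit
    have hkmem : P1.length ∈ List.range order.length := by
      rw [List.mem_range, hsplit]
      simp
    obtain ⟨S, hS, hvS, hclo, s, hs, hprop⟩ := hpre P1.length hkmem
    rw [hsplit, pvTake_prefix] at hS
    rw [hsplit, pvGetD_prefix] at hvS
    refine ⟨S, List.mem_sublists.1 hS, hvS, ?_, s, List.mem_sublists.1 hs, hprop⟩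
    intro x hx y hy hyP
    apply hclo x hx y hy
    rw [hsplit, pvTake_prefix]
    exact hyP
  have hradj : ∀ u y, u ∈ (order.foldl (pvRadjStep d) (pvRadjInit order)).getD y [] ↔
      (y ∈ order ∧ u ∈ order ∧ y ∈ d.getD u []) := pvRadj_adj d order hond
  obtain ⟨colF, adjF, hA, hB⟩ := pvOuter d (order.foldl (pvRadjStep d) (pvRadjInit order))
    order hradj Hpre order [] PySem.Dict.empty PySem.Dict.empty
    (by simp) (by simpa using hond) PySem.Dict.keys_empty
    (by intro x y; rw [PySem.Dict.getD_empty]; simp)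
  show (match order.foldl (pvStepA d) (some (PySem.Dict.empty, ([], PySem.Set.empty))) with
    | none => []
    | some (coloring, _, _) => coloring.items) =
    (order.foldl (pvStepB d (order.foldl (pvRadjStep d) (pvRadjInit order)))
      (PySem.Dict.empty, PySem.Dict.empty)).1.items
  rw [List.nil_append] at hA
  have hinit : (some (PySem.Dict.empty, ([], PySem.Set.empty)) :
      Option (PySem.Dict Int Int × List Int × PySem.Set Int)) =
      some (PySem.Dict.empty, (([] : List Int), ([] : List Int))) := rfl
  rw [hinit, hA, hB]

-- ===== VERDICT (by name: the statement is the Claim_ definition above) =====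
theorem cbip_coloring_spec : Claim_equal_cbip_coloring := by
  intro graph _hdom hpre
  unfold Spec_cbip_coloring
  exact pvFinal graph hpre
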